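-- pv_equiv track=rewrite | github.com/sohan2311/Multi-Agent-AI-System | core/planner_agent.py | _analyze_goal_requirements
-- ===== SOURCE A (Python) =====
-- from typing import Dict, List, Any
--
-- def _analyze_goal_requirements(goal: str) -> List[str]:
--     """Analyze goal to determine which agents are needed"""
--     goal_lower = goal.lower()
--     required_agents = []
--
--     # SpaceX related keywords
--     if any(keyword in goal_lower for keyword in ['spacex', 'launch', 'rocket', 'falcon', 'dragon']):
--         required_agents.append('spacex')
--
--     # Weather related keywords
--     if any(keyword in goal_lower for keyword in ['weather', 'forecast', 'temperature', 'conditions', 'delay']):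
--         required_agents.append('weather')
--
--     # News related keywords
--     if any(keyword in goal_lower for keyword in ['news', 'latest', 'trend', 'market', 'crypto']):
--         required_agents.append('news')
--
--     # Analysis keywords
--     if any(keyword in goal_lower for keyword in ['analyze', 'analysis', 'correlation', 'trend', 'insight']):
--         required_agents.append('analysis')
--
--     # Summary keywords (almost always needed)
--     if any(keyword in goal_lower for keyword in ['summary', 'summarize', 'report', 'conclude']) or len(required_agents) > 1:
--         required_agents.append('summary')
--
--     # Ensure we have at least 2 agents for meaningful chaining
--     if len(required_agents) < 2:
--         if 'spacex' in required_agents: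
--             required_agents.append('weather')
--         required_agents.append('summary')
--
--     return required_agents
-- ===== SOURCE B (Python) =====
-- # B: single left-to-right scan of the goal text, matching a flat keyword->agent table at
-- # each position (hand-rolled multi-pattern matcher) into a found-set, then emitting agents
-- # in canonical order; summary and min-two fallback per the spec.
--
-- _KEYWORD_AGENT = (
--     ('spacex', 'spacex'), ('launch', 'spacex'), ('rocket', 'spacex'),
--     ('falcon', 'spacex'), ('dragon', 'spacex'),
--     ('weather', 'weather'), ('forecast', 'weather'), ('temperature', 'weather'),
--     ('conditions', 'weather'), ('delay', 'weather'),
--     ('news', 'news'), ('latest', 'news'), ('trend', 'news'),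
--     ('market', 'news'), ('crypto', 'news'),
--     ('analyze', 'analysis'), ('analysis', 'analysis'), ('correlation', 'analysis'),
--     ('trend', 'analysis'), ('insight', 'analysis'),
--     ('summary', 'summary'), ('summarize', 'summary'), ('report', 'summary'),
--     ('conclude', 'summary'),
-- )
--
-- def _analyze_goal_requirements(goal: str):
--     g = goal.lower()
--     found = set()
--     for i in range(len(g) + 1):
--         for kw, agent in _KEYWORD_AGENT:
--             if g.startswith(kw, i):
--                 found.add(agent)
--     required = [a for a in ('spacex', 'weather', 'news', 'analysis') if a in found]
--     if 'summary' in found or len(required) > 1: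
--         required.append('summary')
--     if len(required) < 2:
--         if 'spacex' in required:
--             required.append('weather')
--         required.append('summary')
--     return required
-- ===== Notes on version B (the rewrite author's own statement) =====
-- stated objective: alternative
-- what changed: Replaced the four per-group substring membership tests by a single left-to-right positional scan of the goal text against one flat keyword-to-agent table (startswith at each index) that accumulates a found-set, with agents then emitted in canonical order; summary and min-two fallback logic unchanged (B trades the fast built-in substring operator for an explicit scan, so it is slower by a constant factor).
import Mathlib
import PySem

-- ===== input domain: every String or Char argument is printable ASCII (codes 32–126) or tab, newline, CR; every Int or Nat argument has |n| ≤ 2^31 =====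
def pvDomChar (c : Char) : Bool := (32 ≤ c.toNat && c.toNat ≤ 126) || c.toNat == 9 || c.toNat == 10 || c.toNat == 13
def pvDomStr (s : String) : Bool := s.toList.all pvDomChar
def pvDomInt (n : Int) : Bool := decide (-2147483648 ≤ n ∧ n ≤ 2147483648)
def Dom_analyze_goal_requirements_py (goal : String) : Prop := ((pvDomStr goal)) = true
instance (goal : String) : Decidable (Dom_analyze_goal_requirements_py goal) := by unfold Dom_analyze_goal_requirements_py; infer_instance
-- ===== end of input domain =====

-- B replaces A's five per-group substring ('in') tests by a single left-to-right positional
-- scan of the goal matching a flat keyword→agent table into a found-set, then emits agents in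
-- canonical order (objective: alternative; same asymptotic cost).


-- ===== PORT A =====
def analyze_goal_requirements_py (goal : String) : List String :=
  let goal_lower := PySem.Str.lower goal
  let required_agents : List String := []
  let required_agents :=
    if (["spacex", "launch", "rocket", "falcon", "dragon"].any fun k => PySem.Str.isIn k goal_lower)
    then required_agents ++ ["spacex"] else required_agents
  let required_agents :=
    if (["weather", "forecast", "temperature", "conditions", "delay"].any fun k => PySem.Str.isIn k goal_lower)
    then required_agents ++ ["weather"] else required_agents
  let required_agents :=
    if (["news", "latest", "trend", "market", "crypto"].any fun k => PySem.Str.isIn k goal_lower)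
    then required_agents ++ ["news"] else required_agents
  let required_agents :=
    if (["analyze", "analysis", "correlation", "trend", "insight"].any fun k => PySem.Str.isIn k goal_lower)
    then required_agents ++ ["analysis"] else required_agents
  let required_agents :=
    if (["summary", "summarize", "report", "conclude"].any fun k => PySem.Str.isIn k goal_lower)
       || decide (1 < required_agents.length)
    then required_agents ++ ["summary"] else required_agents
  if required_agents.length < 2 then
    (if required_agents.contains "spacex" then required_agents ++ ["weather"] else required_agents) ++ ["summary"]
  else required_agents

-- ===== PORT B =====
def pvKwAgent : List (String × String) :=
  [ ("spacex", "spacex"), ("launch", "spacex"), ("rocket", "spacex"),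
    ("falcon", "spacex"), ("dragon", "spacex"),
    ("weather", "weather"), ("forecast", "weather"), ("temperature", "weather"),
    ("conditions", "weather"), ("delay", "weather"),
    ("news", "news"), ("latest", "news"), ("trend", "news"),
    ("market", "news"), ("crypto", "news"),
    ("analyze", "analysis"), ("analysis", "analysis"), ("correlation", "analysis"),
    ("trend", "analysis"), ("insight", "analysis"),
    ("summary", "summary"), ("summarize", "summary"), ("report", "summary"),
    ("conclude", "summary") ]

-- the inner 'for kw, agent in _KEYWORD_AGENT' body at one position i (g.startswith(kw, i))
def pvScanStep (gl : List Char) (fnd : PySem.Set String) (i : Nat) : PySem.Set String :=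
  pvKwAgent.foldl
    (fun f kv => if PySem.Chars.startswith (gl.drop i) kv.1.toList then PySem.Set.add f kv.2 else f)
    fnd

-- 'for i in range(len(g) + 1): …' building the found-set
def pvScanFound (g : String) : PySem.Set String :=
  (List.range (g.toList.length + 1)).foldl (pvScanStep g.toList) PySem.Set.empty

def analyze_goal_requirements_py_alt (goal : String) : List String :=
  let g := PySem.Str.lower goal
  let found := pvScanFound g
  let required := (["spacex", "weather", "news", "analysis"]).filter
                    (fun a => PySem.Set.contains found a)
  let required := if PySem.Set.contains found "summary" || decide (1 < required.length)
                  then required ++ ["summary"] else required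
  if required.length < 2 then
    (if required.contains "spacex" then required ++ ["weather"] else required) ++ ["summary"]
  else required

-- ===== PRECONDITION & SPEC =====
def Spec_analyze_goal_requirements_py (goal : String) (out : List String) : Prop := out = analyze_goal_requirements_py_alt goal
instance (goal : String) (out : List String) : Decidable (Spec_analyze_goal_requirements_py goal out) := by unfold Spec_analyze_goal_requirements_py; infer_instance

-- ===== CLAIM (what is proved, stated in full; the proofs are below) =====
def Claim_equal_analyze_goal_requirements_py : Prop := ∀ (goal : String), Dom_analyze_goal_requirements_py goal → Spec_analyze_goal_requirements_py goal (analyze_goal_requirements_py goal)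

-- ===== LEMMAS AND PROOFS =====

theorem mem_foldl_kw (L : List (String × String)) (s : List Char) (fnd : PySem.Set String) (a : String) :
    a ∈ L.foldl (fun f kv => if PySem.Chars.startswith s kv.1.toList then PySem.Set.add f kv.2 else f) fnd ↔
      a ∈ fnd ∨ ∃ kv ∈ L, kv.2 = a ∧ PySem.Chars.startswith s kv.1.toList = true := by
  induction L generalizing fnd with
  | nil => simp
  | cons kv L ih =>
    simp only [List.foldl_cons]
    rw [ih]
    cases h : PySem.Chars.startswith s kv.1.toList with
    | false => simp [h]; try tauto
    | true => simp [h, PySem.Set.mem_add]; try tauto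

theorem prefix_drop_bounded_iff (gl kw : List Char) :
    (∃ i ∈ List.range (gl.length + 1), kw <+: gl.drop i) ↔ kw <:+: gl := by
  constructor
  · rintro ⟨i, -, h⟩
    exact List.infix_iff_prefix_suffix.mpr ⟨_, h, List.drop_suffix i gl⟩
  · intro h
    obtain ⟨j, hj⟩ := (PySem.Chars.exists_prefix_drop_iff_isIn kw gl).mpr
      ((PySem.Chars.isIn_iff_infix kw gl).mpr h)
    by_cases hb : j ≤ gl.length
    · exact ⟨j, List.mem_range.mpr (by omega), hj⟩
    · have hnil : gl.drop j = [] := List.drop_eq_nil_of_le (by omega)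
      have : kw = [] := List.prefix_nil.mp (hnil ▸ hj)
      exact ⟨0, List.mem_range.mpr (by omega), this ▸ List.nil_prefix⟩

theorem mem_scanFound (g a : String) :
    a ∈ pvScanFound g ↔ ∃ kv ∈ pvKwAgent, kv.2 = a ∧ kv.1.toList <:+: g.toList := by
  have outer : ∀ (l : List ℕ) (fnd : PySem.Set String),
      a ∈ l.foldl (pvScanStep g.toList) fnd ↔
        a ∈ fnd ∨ ∃ i ∈ l, ∃ kv ∈ pvKwAgent, kv.2 = a ∧
          PySem.Chars.startswith (g.toList.drop i) kv.1.toList = true := by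
    intro l
    induction l with
    | nil => simp
    | cons i l ih =>
      intro fnd
      simp only [List.foldl_cons, ih, pvScanStep, mem_foldl_kw]
      simp only [List.mem_cons, exists_eq_or_imp]
      exact or_assoc
  rw [pvScanFound, outer]
  simp only [PySem.Set.empty, List.not_mem_nil, false_or]
  constructor
  · rintro ⟨i, hi, kv, hkv, ha, hsw⟩
    exact ⟨kv, hkv, ha, List.infix_iff_prefix_suffix.mpr
      ⟨_, (PySem.Chars.startswith_iff _ _).mp hsw, List.drop_suffix i g.toList⟩⟩
  · rintro ⟨kv, hkv, ha, hinf⟩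
    obtain ⟨i, hi, hp⟩ := (prefix_drop_bounded_iff g.toList kv.1.toList).mpr hinf
    exact ⟨i, hi, kv, hkv, ha, (PySem.Chars.startswith_iff _ _).mpr hp⟩

theorem contains_scanFound (g a : String) :
    PySem.Set.contains (pvScanFound g) a =
      pvKwAgent.any (fun kv => kv.2 == a && PySem.Str.isIn kv.1 g) := by
  rw [Bool.eq_iff_iff]
  simp only [PySem.Set.contains, List.contains_iff_mem, mem_scanFound, List.any_eq_true,
    Bool.and_eq_true, beq_iff_eq, PySem.Str.isIn_iff_infix]
  try tauto

theorem contains_spacex (g : String) :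
    PySem.Set.contains (pvScanFound g) "spacex" =
      (["spacex", "launch", "rocket", "falcon", "dragon"].any fun k => PySem.Str.isIn k g) := by
  rw [contains_scanFound, Bool.eq_iff_iff]
  simp [pvKwAgent]

theorem contains_weather (g : String) :
    PySem.Set.contains (pvScanFound g) "weather" =
      (["weather", "forecast", "temperature", "conditions", "delay"].any fun k => PySem.Str.isIn k g) := by
  rw [contains_scanFound, Bool.eq_iff_iff]
  simp [pvKwAgent]

theorem contains_news (g : String) :
    PySem.Set.contains (pvScanFound g) "news" =
      (["news", "latest", "trend", "market", "crypto"].any fun k => PySem.Str.isIn k g) := by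
  rw [contains_scanFound, Bool.eq_iff_iff]
  simp [pvKwAgent]

theorem contains_analysis (g : String) :
    PySem.Set.contains (pvScanFound g) "analysis" =
      (["analyze", "analysis", "correlation", "trend", "insight"].any fun k => PySem.Str.isIn k g) := by
  rw [contains_scanFound, Bool.eq_iff_iff]
  simp [pvKwAgent]

theorem contains_summary (g : String) :
    PySem.Set.contains (pvScanFound g) "summary" =
      (["summary", "summarize", "report", "conclude"].any fun k => PySem.Str.isIn k g) := by
  rw [contains_scanFound, Bool.eq_iff_iff]
  simp [pvKwAgent]

-- ===== VERDICT (by name: the statement is the Claim_ definition above) =====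
theorem analyze_goal_requirements_py_spec : Claim_equal_analyze_goal_requirements_py := by
  intro goal _
  unfold Spec_analyze_goal_requirements_py analyze_goal_requirements_py analyze_goal_requirements_py_alt
  simp only [List.filter, contains_spacex, contains_weather, contains_news, contains_analysis,
    contains_summary]
  cases h1 : (["spacex", "launch", "rocket", "falcon", "dragon"].any fun k => PySem.Str.isIn k (PySem.Str.lower goal)) <;>
  cases h2 : (["weather", "forecast", "temperature", "conditions", "delay"].any fun k => PySem.Str.isIn k (PySem.Str.lower goal)) <;>
  cases h3 : (["news", "latest", "trend", "market", "crypto"].any fun k => PySem.Str.isIn k (PySem.Str.lower goal)) <;>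
  cases h4 : (["analyze", "analysis", "correlation", "trend", "insight"].any fun k => PySem.Str.isIn k (PySem.Str.lower goal)) <;>
  cases h5 : (["summary", "summarize", "report", "conclude"].any fun k => PySem.Str.isIn k (PySem.Str.lower goal)) <;>
  rfl
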